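-- pv_equiv track=rewrite | github.com/Cho-SangHyun/Algorithm-Study | 백준/1062-가르침.py | solution
-- ===== SOURCE A (Python) =====
-- from itertools import combinations
--
-- def solution(n, k, words):
--     if k < 5:
--         return 0
--
--     total_alphas = set()
--     basic = set(['a', 'n', 't', 'i', 'c'])
--     alphas_per_word = []
--
--     for word in words:
--         alphas = set()
--         for ch in word[4:-4]:
--             if ch in basic:
--                 continue
--             alphas.add(ch)
--             total_alphas.add(ch)
--         alphas_per_word.append(alphas)
--
--     answer = -1
--
--     x = k - 5 if len(total_alphas) >= k - 5 else len(total_alphas)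
--
--     for comb in combinations(total_alphas, x):
--         comb = set(comb)
--         mid_answer = 0
--         for alpha in alphas_per_word:
--             if len(alpha) == 0:
--                 mid_answer += 1
--                 continue
--             for ch in alpha:
--                 if ch not in comb:
--                     break
--             else:
--                 mid_answer += 1
--         answer = max(answer, mid_answer)
--     return answer
-- ===== SOURCE B (Python) =====
-- def solution(n, k, words):
--     if k < 5:
--         return 0
--
--     total_alphas = set()
--     basic = set(['a', 'n', 't', 'i', 'c'])
--     alphas_per_word = []
--
--     for word in words:
--         alphas = set()
--         for ch in word[4:-4]:
--             if ch in basic: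
--                 continue
--             alphas.add(ch)
--             total_alphas.add(ch)
--         alphas_per_word.append(alphas)
--
--     x = k - 5 if len(total_alphas) >= k - 5 else len(total_alphas)
--
--     letters = list(total_alphas)
--
--     def dfs(i, budget, taught):
--         if budget == 0:
--             return sum(1 for alpha in alphas_per_word if alpha <= taught)
--         if len(letters) - i < budget:
--             return -1
--         return max(dfs(i + 1, budget - 1, taught | {letters[i]}),
--                    dfs(i + 1, budget, taught))
--
--     return dfs(0, x, set())
-- ===== Notes on version B (the rewrite author's own statement) =====
-- stated objective: alternative
-- what changed: The itertools.combinations enumeration plus per-combination break-loop counting is replaced by a recursive include/skip DFS over the letter list that threads a taught-set and a remaining budget and counts subset-words (issubset) at exhausted-budget leaves.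
import Mathlib
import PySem

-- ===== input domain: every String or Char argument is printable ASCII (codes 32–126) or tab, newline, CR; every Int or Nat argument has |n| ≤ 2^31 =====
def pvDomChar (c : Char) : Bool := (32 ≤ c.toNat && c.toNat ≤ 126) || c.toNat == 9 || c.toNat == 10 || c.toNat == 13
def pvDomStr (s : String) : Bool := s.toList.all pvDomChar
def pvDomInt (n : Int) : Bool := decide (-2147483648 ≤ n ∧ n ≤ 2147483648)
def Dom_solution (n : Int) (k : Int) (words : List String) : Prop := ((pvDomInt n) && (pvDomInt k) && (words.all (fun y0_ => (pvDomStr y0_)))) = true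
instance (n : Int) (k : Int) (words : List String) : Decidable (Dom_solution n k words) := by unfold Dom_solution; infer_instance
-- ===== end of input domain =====

-- B replaces A's itertools.combinations enumeration with a recursive include/skip DFS that
-- threads a taught-set and a remaining budget, counting subset words at exhausted-budget leaves
-- (objective: alternative decomposition; same preprocessing, same results).

-- ===== PORT A =====

-- basic = set(['a','n','t','i','c'])
def pvBasic : PySem.Set Char := PySem.Set.ofList ['a', 'n', 't', 'i', 'c']

-- one step of the inner `for ch in word[4:-4]` loop; state = (alphas, total_alphas)
def pvStepA (q : PySem.Set Char × PySem.Set Char) (ch : Char) : PySem.Set Char × PySem.Set Char :=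
  if PySem.Set.contains pvBasic ch then q
  else (PySem.Set.add q.1 ch, PySem.Set.add q.2 ch)

-- the preprocessing loop `for word in words`, shared verbatim by A and B (Source B repeats it literally);
-- state = (total_alphas, alphas_per_word)
def pvPrep (words : List String) : PySem.Set Char × List (PySem.Set Char) :=
  words.foldl
    (fun st word =>
      let p := (PySem.List.slice word.toList (some 4) (some (-4))).foldl pvStepA (PySem.Set.empty, st.1)
      (p.2, st.2 ++ [p.1]))
    (PySem.Set.empty, [])

-- A's `for ch in alpha: if ch not in comb: break / else: …` loop (true = the else branch runs)
def pvAllIn : List Char → PySem.Set Char → Bool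
  | [], _ => true
  | c :: cs, s => if ! PySem.Set.contains s c then false else pvAllIn cs s

-- A's mid_answer loop over alphas_per_word
def pvCountA (per : List (PySem.Set Char)) (comb : PySem.Set Char) : Int :=
  per.foldl
    (fun m alpha =>
      if PySem.Set.len alpha == 0 then m + 1
      else if pvAllIn alpha comb then m + 1 else m)
    0

def solution (n : Int) (k : Int) (words : List String) : Int :=
  if k < 5 then 0
  else
    let st := pvPrep words
    let x : Int := if PySem.Set.len st.1 ≥ k - 5 then k - 5 else PySem.Set.len st.1
    (PySem.List.combinations st.1 x.toNat).foldl
      (fun answer comb => max answer (pvCountA st.2 (PySem.Set.ofList comb)))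
      (-1)

-- ===== PORT B =====

-- B's leaf count: sum(1 for alpha in alphas_per_word if alpha <= taught)
def pvCountB (per : List (PySem.Set Char)) (taught : PySem.Set Char) : Int :=
  ((per.filter (fun alpha => PySem.Set.issubset alpha taught)).length : Int)

-- B's dfs(i, budget, taught); the index i becomes structural recursion on the letters suffix,
-- `len(letters) - i < budget` is the rest.length + 1 < b + 1 guard (and the [] case when budget > 0)
def pvDfs (per : List (PySem.Set Char)) : List Char → Nat → PySem.Set Char → Int
  | _, 0, taught => pvCountB per taught
  | [], _ + 1, _ => -1
  | l :: rest, b + 1, taught =>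
    if rest.length + 1 < b + 1 then -1
    else
      max (pvDfs per rest b (PySem.Set.union taught (PySem.Set.ofList [l])))
          (pvDfs per rest (b + 1) taught)

def solution_alt (n : Int) (k : Int) (words : List String) : Int :=
  if k < 5 then 0
  else
    let st := pvPrep words
    let x : Int := if PySem.Set.len st.1 ≥ k - 5 then k - 5 else PySem.Set.len st.1
    pvDfs st.2 st.1 x.toNat PySem.Set.empty

-- ===== PRECONDITION & SPEC =====
def Spec_solution (n : Int) (k : Int) (words : List String) (out : Int) : Prop := out = solution_alt n k words
instance (n : Int) (k : Int) (words : List String) (out : Int) : Decidable (Spec_solution n k words out) := by unfold Spec_solution; infer_instance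

-- ===== CLAIM (what is proved, stated in full; the proofs are below) =====
def Claim_equal_solution : Prop := ∀ (n : Int) (k : Int) (words : List String), Dom_solution n k words → Spec_solution n k words (solution n k words)

-- ===== LEMMAS AND PROOFS =====

theorem pvCountB_nonneg (per : List (PySem.Set Char)) (s : PySem.Set Char) :
    0 ≤ pvCountB per s := by
  simp [pvCountB]

theorem pvDfs_ge (per : List (PySem.Set Char)) :
    ∀ (letters : List Char) (b : Nat) (t : PySem.Set Char), -1 ≤ pvDfs per letters b t := by
  intro letters
  induction letters with
  | nil =>
    intro b t
    cases b with
    | zero => exact le_trans (by norm_num) (pvCountB_nonneg per t)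
    | succ b => simp [pvDfs]
  | cons l rest ih =>
    intro b t
    cases b with
    | zero => exact le_trans (by norm_num) (pvCountB_nonneg per t)
    | succ b =>
      rw [show pvDfs per (l :: rest) (b + 1) t
            = if rest.length + 1 < b + 1 then -1
              else max (pvDfs per rest b (PySem.Set.union t (PySem.Set.ofList [l])))
                       (pvDfs per rest (b + 1) t) from rfl]
      by_cases hg : rest.length + 1 < b + 1
      · simp [hg]
      · rw [if_neg hg]
        exact le_trans (ih _ _) (le_max_right _ _)

theorem pvDfs_short (per : List (PySem.Set Char)) :
    ∀ (letters : List Char) (b : Nat) (t : PySem.Set Char),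
      letters.length < b → pvDfs per letters b t = -1 := by
  intro letters b t h
  cases letters with
  | nil =>
    cases b with
    | zero => omega
    | succ b => rfl
  | cons l rest =>
    cases b with
    | zero => simp at h
    | succ b =>
      simp only [List.length_cons] at h
      rw [show pvDfs per (l :: rest) (b + 1) t
            = if rest.length + 1 < b + 1 then -1
              else max (pvDfs per rest b (PySem.Set.union t (PySem.Set.ofList [l])))
                       (pvDfs per rest (b + 1) t) from rfl]
      rw [if_pos h]

theorem pvAllIn_iff (s : PySem.Set Char) :
    ∀ (cs : List Char), pvAllIn cs s = true ↔ ∀ c ∈ cs, c ∈ s := by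
  intro cs
  induction cs with
  | nil => simp [pvAllIn]
  | cons c cs ih =>
    simp only [pvAllIn]
    rcases hc : PySem.Set.contains s c with _ | _
    · have hc' : c ∉ s := by
        intro h
        have h2 := (PySem.Set.contains_iff s c).mpr h
        rw [hc] at h2
        exact Bool.false_ne_true h2
      simp [hc, hc']
    · have hc' : c ∈ s := (PySem.Set.contains_iff s c).mp hc
      simp [hc, ih, hc']

theorem pvAllIn_eq_issubset (cs : List Char) (s : PySem.Set Char) :
    pvAllIn cs s = PySem.Set.issubset cs s := by
  rcases h : PySem.Set.issubset cs s with _ | _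
  · rcases h' : pvAllIn cs s with _ | _
    · rfl
    · rw [pvAllIn_iff] at h'
      rw [← PySem.Set.issubset_iff cs s] at h'
      simp [h] at h'
  · rw [PySem.Set.issubset_iff] at h
    rw [pvAllIn_iff]
    exact h

theorem pvCountA_foldl (s : PySem.Set Char) :
    ∀ (per : List (PySem.Set Char)) (m : Int),
      per.foldl
        (fun m alpha =>
          if PySem.Set.len alpha == 0 then m + 1
          else if pvAllIn alpha s then m + 1 else m) m
      = m + pvCountB per s := by
  intro per
  induction per with
  | nil => intro m; simp [pvCountB]
  | cons alpha per ih =>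
    intro m
    simp only [List.foldl_cons]
    have hsplit : (if PySem.Set.len alpha == 0 then m + 1 else if pvAllIn alpha s then m + 1 else m)
        = if PySem.Set.issubset alpha s then m + 1 else m := by
      rcases alpha with _ | ⟨c, cs⟩
      · have h0 : PySem.Set.issubset ([] : PySem.Set Char) s = true := by
          rw [PySem.Set.issubset_iff]; simp
        simp [PySem.Set.len, h0]
      · have hlen : (PySem.Set.len (c :: cs) == (0 : Int)) = false := by
          rw [beq_eq_false_iff_ne]
          simp only [PySem.Set.len, List.length_cons]
          omega
        rw [hlen, pvAllIn_eq_issubset]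
        simp
    rw [hsplit, ih]
    unfold pvCountB
    rcases h : PySem.Set.issubset alpha s with _ | _ <;>
      simp [List.filter_cons, h] <;> omega

theorem pvCountA_eq (per : List (PySem.Set Char)) (s : PySem.Set Char) :
    pvCountA per s = pvCountB per s := by
  unfold pvCountA
  rw [pvCountA_foldl]
  omega

theorem pvUnion_single (t : PySem.Set Char) (l : Char) :
    PySem.Set.union t (PySem.Set.ofList [l]) = PySem.Set.add t l := rfl

theorem pvCombs_fold (per : List (PySem.Set Char)) :
    ∀ (letters : List Char) (b : Nat) (acc : PySem.Set Char) (a : Int), -1 ≤ a →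
      (PySem.List.combinations letters b).foldl
        (fun ans comb => max ans (pvCountA per (comb.foldl PySem.Set.add acc))) a
      = max a (pvDfs per letters b acc) := by
  intro letters
  induction letters with
  | nil =>
    intro b acc a ha
    cases b with
    | zero =>
      simp only [PySem.List.combinations_zero, List.foldl_cons, List.foldl_nil]
      rw [show pvDfs per [] 0 acc = pvCountB per acc from rfl]
      simp [pvCountA_eq]
    | succ b =>
      simp only [PySem.List.combinations_nil_succ, List.foldl_nil]
      rw [show pvDfs per [] (b + 1) acc = -1 from rfl]
      rw [max_eq_left ha]
  | cons l rest ih =>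
    intro b acc a ha
    cases b with
    | zero =>
      simp only [PySem.List.combinations_zero, List.foldl_cons, List.foldl_nil]
      rw [show pvDfs per (l :: rest) 0 acc = pvCountB per acc from rfl]
      simp [pvCountA_eq]
    | succ b =>
      rw [PySem.List.combinations_cons_succ, List.foldl_append, List.foldl_map]
      have hbody :
          (fun (ans : Int) (comb : List Char) =>
            max ans (pvCountA per (List.foldl PySem.Set.add acc (l :: comb))))
          = (fun (ans : Int) (comb : List Char) =>
            max ans (pvCountA per (List.foldl PySem.Set.add (PySem.Set.add acc l) comb))) := by
        funext ans comb
        simp [List.foldl_cons]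
      rw [hbody, ih b (PySem.Set.add acc l) a ha]
      rw [ih (b + 1) acc _ (le_trans ha (le_max_left _ _))]
      rw [show pvDfs per (l :: rest) (b + 1) acc
            = if rest.length + 1 < b + 1 then -1
              else max (pvDfs per rest b (PySem.Set.union acc (PySem.Set.ofList [l])))
                       (pvDfs per rest (b + 1) acc) from rfl]
      rw [pvUnion_single]
      by_cases hg : rest.length + 1 < b + 1
      · rw [if_pos hg, pvDfs_short per rest b _ (by omega),
            pvDfs_short per rest (b + 1) acc (by omega)]
        rw [max_eq_left ha, max_eq_left ha]
      · rw [if_neg hg, max_assoc]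

-- ===== VERDICT (by name: the statement is the Claim_ definition above) =====
theorem solution_spec : Claim_equal_solution := by
  intro n k words _
  unfold Spec_solution solution solution_alt
  by_cases hk : k < 5
  · simp [hk]
  · simp only [hk, if_false]
    have h := pvCombs_fold (pvPrep words).2 (pvPrep words).1
      (if PySem.Set.len (pvPrep words).1 ≥ k - 5 then k - 5 else PySem.Set.len (pvPrep words).1).toNat
      PySem.Set.empty (-1) le_rfl
    have hofList : ∀ comb : List Char,
        PySem.Set.ofList comb = comb.foldl PySem.Set.add PySem.Set.empty := fun _ => rfl
    simp only [hofList]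
    rw [h]
    exact max_eq_right (pvDfs_ge _ _ _ _)
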